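-- pv_equiv track=rewrite | github.com/Siguoqing/NurbsVQVAE_code | 2sequence_nurbs.py | dfs_face_ordering_from_core
-- ===== SOURCE A (Python) =====
-- def dfs_face_ordering_from_core(edge_face_pairs, num_faces):
--     """
--     面的 DFS 排序：从连接数最多的核心面开始遍历
--     """
--     nbrs = [set() for _ in range(num_faces)]
--     for f1, f2 in edge_face_pairs:
--         if 0 <= f1 < num_faces and 0 <= f2 < num_faces and f1 != f2:
--             nbrs[f1].add(f2);
--             nbrs[f2].add(f1)
--     deg = [len(n) for n in nbrs]
--
--     visited = [False] * num_faces
--     face_order = []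
--
--     seeds = sorted(range(num_faces), key=lambda x: (-deg[x], x))
--
--     def dfs(u):
--         visited[u] = True
--         face_order.append(u)
--         unvisited_neighbors = [v for v in nbrs[u] if not visited[v]]
--         unvisited_neighbors.sort(key=lambda x: (deg[x], x))
--         for v in unvisited_neighbors:
--             if not visited[v]:
--                 dfs(v)
--
--     for s in seeds:
--         if not visited[s]:
--             dfs(s)
--
--     face_position_map = {f: i for i, f in enumerate(face_order)}
--     return face_order, face_position_map
-- ===== SOURCE B (Python) =====
-- def dfs_face_ordering_from_core(edge_face_pairs, num_faces):
--     """
--     Same ordering via different machinery: dict-of-sets adjacency, per-face neighbor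
--     lists presorted (descending) once before traversal, a visited *set*, and an
--     explicit-stack DFS instead of A's recursion over a boolean array.
--     """
--     adj = {}
--     for f1, f2 in edge_face_pairs:
--         if 0 <= f1 < num_faces and 0 <= f2 < num_faces and f1 != f2:
--             adj.setdefault(f1, set()).add(f2)
--             adj.setdefault(f2, set()).add(f1)
--     deg = {f: len(s) for f, s in adj.items()}
--     desc = {f: sorted(s, key=lambda x: (deg.get(x, 0), x), reverse=True)
--             for f, s in adj.items()}
--
--     seen = set()
--     order = []
--     for s in sorted(range(num_faces), key=lambda x: (-deg.get(x, 0), x)):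
--         if s not in seen:
--             stack = [s]
--             while stack:
--                 u = stack.pop()
--                 if u not in seen:
--                     seen.add(u)
--                     order.append(u)
--                     stack.extend(v for v in desc.get(u, ()) if v not in seen)
--
--     return order, {f: i for i, f in enumerate(order)}
-- ===== Notes on version B (the rewrite author's own statement) =====
-- stated objective: alternative
-- what changed: B swaps every data structure and the traversal mechanism: adjacency lives in a dict of sets instead of a face-indexed list of sets, each face's neighbor list is sorted once (descending) before the traversal instead of sorting the unvisited neighbors at every visit, visited faces are a set instead of a boolean list, and the recursive dfs is replaced by an explicit-stack loop that filters the presorted list at push time.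
import Mathlib
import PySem

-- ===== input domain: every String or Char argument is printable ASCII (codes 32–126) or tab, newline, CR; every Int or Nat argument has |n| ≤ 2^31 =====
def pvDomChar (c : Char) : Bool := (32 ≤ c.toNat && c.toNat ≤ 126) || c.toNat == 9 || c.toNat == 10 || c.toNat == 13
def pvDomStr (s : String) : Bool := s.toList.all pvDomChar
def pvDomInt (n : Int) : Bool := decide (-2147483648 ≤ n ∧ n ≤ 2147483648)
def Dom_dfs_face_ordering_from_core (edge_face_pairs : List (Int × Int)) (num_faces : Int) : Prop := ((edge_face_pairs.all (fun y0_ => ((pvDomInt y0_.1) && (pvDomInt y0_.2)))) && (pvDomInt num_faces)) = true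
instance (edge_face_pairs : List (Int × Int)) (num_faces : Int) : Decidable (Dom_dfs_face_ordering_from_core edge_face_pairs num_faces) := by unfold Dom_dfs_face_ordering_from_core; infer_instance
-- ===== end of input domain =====

-- B replaces A's machinery wholesale: dict-of-sets adjacency instead of a list of sets
-- indexed by face, neighbor lists presorted (descending) once before the traversal instead
-- of sorted inside it, a visited SET instead of a boolean list, and an explicit-stack loop
-- instead of recursion (objective: alternative decomposition; same asymptotic cost).

-- ===== PORT A =====
-- A keeps a list of Python sets indexed by face: an Array (List Int), each entry holding the
-- DISTINCT neighbors in insertion order (the set's iteration order is irrelevant: A sorts by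
-- the injective key (deg x, x) before using it).  Indices are guarded into [0, num_faces),
-- so Int.toNat never clamps a live index.

-- nbrs[k].add(v) on a Python set
def pvAddNbr (m : Array (List Int)) (k v : Int) : Array (List Int) :=
  if (m.getD k.toNat []).contains v then m
  else m.setIfInBounds k.toNat ((m.getD k.toNat []) ++ [v])

def pvBuildNbrs (edge_face_pairs : List (Int × Int)) (num_faces : Int) : Array (List Int) :=
  edge_face_pairs.foldl (fun m p =>
    if 0 ≤ p.1 ∧ p.1 < num_faces ∧ 0 ≤ p.2 ∧ p.2 < num_faces ∧ p.1 ≠ p.2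
    then pvAddNbr (pvAddNbr m p.1 p.2) p.2 p.1 else m)
    (Array.replicate num_faces.toNat [])

-- deg = [len(n) for n in nbrs]
def pvDegs (nbrs : Array (List Int)) : Array Int :=
  nbrs.map (fun l => (l.length : Int))

-- seeds = sorted(range(num_faces), key=lambda x: (-deg[x], x))
def pvSeeds (deg : Array Int) (num_faces : Int) : List Int :=
  PySem.List.sorted2 (PySem.List.pyRange 0 num_faces 1)
    (fun x => -(deg.getD x.toNat 0)) (fun x => x)

-- unvisited_neighbors.sort(key=lambda x: (deg[x], x))
def pvSortNbrs (deg : Array Int) (l : List Int) : List Int :=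
  PySem.List.sorted2 l (fun x => deg.getD x.toNat 0) (fun x => x)

-- A's recursive dfs: state = (visited : Array Bool, face_order : Array Int); the fuel
-- bounds the recursion depth (depth ≤ number of unvisited faces ≤ num_faces).
def pvDfsA (nbrs : Array (List Int)) (deg : Array Int) :
    Nat → Int → (Array Bool × Array Int) → (Array Bool × Array Int)
  | 0, _, st => st
  | f+1, u, st =>
    let vis := st.1.setIfInBounds u.toNat true
    let ord := st.2.push u
    let uns := pvSortNbrs deg ((nbrs.getD u.toNat []).filter (fun v => !(vis.getD v.toNat false)))
    uns.foldl (fun s v => if s.1.getD v.toNat false then s else pvDfsA nbrs deg f v s) (vis, ord)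

def dfs_face_ordering_from_core (edge_face_pairs : List (Int × Int)) (num_faces : Int) :
    List Int × (List (Int × Int)) :=
  let nbrs := pvBuildNbrs edge_face_pairs num_faces
  let deg := pvDegs nbrs
  let st := (pvSeeds deg num_faces).foldl
    (fun s u => if s.1.getD u.toNat false then s else pvDfsA nbrs deg num_faces.toNat u s)
    (Array.replicate num_faces.toNat false, #[])
  (st.2.toList, (PySem.List.enumerate st.2.toList 0).map (fun p => (p.2, p.1)))

-- ===== PORT B =====
-- B (Source B) keeps adjacency in a dict of Python sets.  adj.setdefault(k, set()).add(v)
-- appends the key if new and updates its set in place — exactly PySem.Dict.insert of the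
-- updated PySem.Set.
def pvAdjB (edge_face_pairs : List (Int × Int)) (num_faces : Int) :
    PySem.Dict Int (PySem.Set Int) :=
  edge_face_pairs.foldl (fun d p =>
    if 0 ≤ p.1 ∧ p.1 < num_faces ∧ 0 ≤ p.2 ∧ p.2 < num_faces ∧ p.1 ≠ p.2 then
      let d1 := d.insert p.1 (PySem.Set.add (d.getD p.1 []) p.2)
      d1.insert p.2 (PySem.Set.add (d1.getD p.2 []) p.1)
    else d) PySem.Dict.empty

-- deg = {f: len(s) for f, s in adj.items()}
def pvDegB (adj : PySem.Dict Int (PySem.Set Int)) : PySem.Dict Int Int :=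
  adj.items.foldl (fun d p => d.insert p.1 (p.2.length : Int)) PySem.Dict.empty

-- desc = {f: sorted(s, key=lambda x: (deg.get(x, 0), x), reverse=True) for f, s in adj.items()}
def pvDescB (adj : PySem.Dict Int (PySem.Set Int)) (deg : PySem.Dict Int Int) :
    PySem.Dict Int (List Int) :=
  adj.items.foldl (fun d p =>
    d.insert p.1 (PySem.List.sorted2 p.2 (fun x => deg.getD x 0) (fun x => x) true))
    PySem.Dict.empty

-- the while-stack loop; head of the Lean list = top of the Python stack (stack.pop() pops
-- the Python list's END, so stack.extend(filtered descending list) PREPENDS it reversed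
-- here).  seen is a Python set (list of distinct ints), order a plain list; the fuel bounds
-- the number of unvisited pops (≤ num_faces).
def pvStackB (desc : PySem.Dict Int (List Int)) :
    Nat → List Int → (List Int × List Int) → (List Int × List Int)
  | _, [], st => st
  | f, u :: rest, st =>
    if st.1.contains u then pvStackB desc f rest st
    else match f with
      | 0 => st
      | f+1 =>
        let seen := PySem.Set.add st.1 u
        let ord := st.2 ++ [u]
        pvStackB desc f
          (((desc.getD u []).filter (fun v => !(seen.contains v))).reverse ++ rest)
          (seen, ord)
  termination_by f stack _ => (f, stack.length)

def dfs_face_ordering_from_core_alt (edge_face_pairs : List (Int × Int)) (num_faces : Int) :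
    List Int × (List (Int × Int)) :=
  let adj := pvAdjB edge_face_pairs num_faces
  let deg := pvDegB adj
  let desc := pvDescB adj deg
  let st := (PySem.List.sorted2 (PySem.List.pyRange 0 num_faces 1)
      (fun x => -(deg.getD x 0)) (fun x => x) false).foldl
    (fun s u => if s.1.contains u then s else pvStackB desc num_faces.toNat [u] s)
    ([], [])
  (st.2, (PySem.List.enumerate st.2 0).map (fun p => (p.2, p.1)))

-- ===== PRECONDITION & SPEC =====
def Spec_dfs_face_ordering_from_core (edge_face_pairs : List (Int × Int)) (num_faces : Int) (out : List Int × (List (Int × Int))) : Prop := out = dfs_face_ordering_from_core_alt edge_face_pairs num_faces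
instance (edge_face_pairs : List (Int × Int)) (num_faces : Int) (out : List Int × (List (Int × Int))) : Decidable (Spec_dfs_face_ordering_from_core edge_face_pairs num_faces out) := by unfold Spec_dfs_face_ordering_from_core; infer_instance

-- ===== CLAIM (what is proved, stated in full; the proofs are below) =====
def Claim_equal_dfs_face_ordering_from_core : Prop := ∀ (edge_face_pairs : List (Int × Int)) (num_faces : Int), Dom_dfs_face_ordering_from_core edge_face_pairs num_faces → Spec_dfs_face_ordering_from_core edge_face_pairs num_faces (dfs_face_ordering_from_core edge_face_pairs num_faces)

-- ===== LEMMAS AND PROOFS =====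

-- ---------- generic array/sort facts ----------

-- getD after setIfInBounds, pointwise
theorem pvGetD_set {α : Type} (a : Array α) (i j : Nat) (v d : α) :
    (a.setIfInBounds i v).getD j d = if j = i ∧ i < a.size then v else a.getD j d := by
  by_cases hj : j < a.size
  · rw [Array.getD_eq_getD_getElem?, Array.getD_eq_getD_getElem?]
    rw [Array.getElem?_setIfInBounds]
    by_cases hij : i = j
    · subst hij
      simp [hj]
    · have : ¬(j = i ∧ i < a.size) := fun h => hij h.1.symm
      simp [hij, this]
  · have hsz : (a.setIfInBounds i v).size = a.size := Array.size_setIfInBounds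
    have h1 : (a.setIfInBounds i v).getD j d = d := by
      rw [Array.getD_eq_getD_getElem?]
      rw [Array.getElem?_eq_none (by omega)]
      rfl
    have h2 : a.getD j d = d := by
      rw [Array.getD_eq_getD_getElem?]
      rw [Array.getElem?_eq_none (by omega)]
      rfl
    by_cases hji : j = i ∧ i < a.size
    · omega
    · rw [if_neg hji, h1, h2]

theorem pvReplicate_getD {α : Type} (m : Nat) (x d : α) (i : Nat) (hx : x = d) :
    (Array.replicate m x).getD i d = d := by
  rw [Array.getD_eq_getD_getElem?, Array.getElem?_replicate]
  by_cases hi : i < m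
  · simp [hi, hx]
  · simp [hi]

theorem pvDegs_getD (nbrs : Array (List Int)) (i : Nat) :
    (pvDegs nbrs).getD i 0 = ((nbrs.getD i []).length : Int) := by
  unfold pvDegs
  rw [Array.getD_eq_getD_getElem?, Array.getD_eq_getD_getElem?, Array.getElem?_map]
  by_cases hi : i < nbrs.size
  · simp [Array.getElem?_eq_getElem (by simpa using hi)]
  · rw [Array.getElem?_eq_none (by omega)]; rfl

-- sorted2 with an Int pair key IS sorted with the lexicographic key
theorem pvSorted2_eq_sortedLex (xs : List Int) (k1 k2 : Int → Int) (rev : Bool) :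
    PySem.List.sorted2 xs k1 k2 rev
      = PySem.List.sorted xs (fun x => toLex (k1 x, k2 x)) rev := by
  have hb : ∀ a b : Int, (decide (k1 a < k1 b) || (!decide (k1 b < k1 a) && decide (k2 a < k2 b)))
      = decide (toLex (k1 a, k2 a) < toLex (k1 b, k2 b)) := by
    intro a b
    by_cases h1 : k1 a < k1 b <;> by_cases h2 : k1 b < k1 a <;> by_cases h3 : k2 a < k2 b <;>
      simp [Prod.Lex.toLex_lt_toLex, h1, h2, h3] <;> omega
  simp only [PySem.List.sorted2, PySem.List.sorted]
  cases rev
  · have : (fun (a b : Int) => decide (k1 a < k1 b) || (!decide (k1 b < k1 a) && decide (k2 a < k2 b)))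
        = (fun a b => decide (toLex (k1 a, k2 a) < toLex (k1 b, k2 b))) := by
      funext a b; exact hb a b
    simpa using congrArg (fun before => xs.foldl (fun acc x => PySem.List.insertBy before x acc) []) this
  · have : (fun (a b : Int) => decide (k1 b < k1 a) || (!decide (k1 a < k1 b) && decide (k2 b < k2 a)))
        = (fun a b => decide (toLex (k1 b, k2 b) < toLex (k1 a, k2 a))) := by
      funext a b; exact hb b a
    simpa using congrArg (fun before => xs.foldl (fun acc x => PySem.List.insertBy before x acc) []) this

theorem pvSorted2_pairwise (xs : List Int) (k : Int → Int) :
    (PySem.List.sorted2 xs k (fun x => x) false).Pairwise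
      (fun a b => toLex (k a, a) ≤ toLex (k b, b)) := by
  rw [pvSorted2_eq_sortedLex]
  exact PySem.List.sorted_pairwise xs _

-- ≤ plus distinctness gives < (the tuple key (k x, x) is injective in x)
theorem pvPairwise_lt_of_le_nodup (l : List Int) (k : Int → Int)
    (hle : l.Pairwise (fun a b => toLex (k a, a) ≤ toLex (k b, b)))
    (hnd : l.Nodup) : l.Pairwise (fun a b => toLex (k a, a) < toLex (k b, b)) := by
  refine (hle.and hnd).imp ?_
  intro a b h
  refine lt_of_le_of_ne h.1 (fun he => h.2 ?_)
  have := congrArg ofLex he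
  simpa using (congrArg Prod.snd this)

theorem pvSorted2_eq_of_perm_of_pairwise_lt (xs ys : List Int) (k : Int → Int)
    (hp : ys.Perm xs) (hlt : ys.Pairwise (fun a b => toLex (k a, a) < toLex (k b, b))) :
    PySem.List.sorted2 xs k (fun x => x) false = ys := by
  rw [pvSorted2_eq_sortedLex]
  exact PySem.List.sorted_eq_of_perm_of_pairwise_lt xs ys _ hp hlt

theorem pvSorted2_rev_eq_of_perm_of_pairwise_gt (xs ys : List Int) (k : Int → Int)
    (hp : ys.Perm xs) (hgt : ys.Pairwise (fun a b => toLex (k b, b) < toLex (k a, a))) :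
    PySem.List.sorted2 xs k (fun x => x) true = ys := by
  rw [pvSorted2_eq_sortedLex]
  exact PySem.List.sorted_rev_eq_of_perm_of_pairwise_gt xs ys _ hp hgt

-- ---------- A-side structural facts ----------

theorem pvSortNbrs_mem (deg : Array Int) (l : List Int) (v : Int) :
    v ∈ pvSortNbrs deg l ↔ v ∈ l := by
  unfold pvSortNbrs
  exact (PySem.List.sorted2_perm l _ _ false).mem_iff

theorem pvSeeds_mem (deg : Array Int) (n u : Int) (h : u ∈ pvSeeds deg n) :
    0 ≤ u ∧ u < n := by
  unfold pvSeeds at h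
  have := (PySem.List.sorted2_perm (PySem.List.pyRange 0 n 1) _ _ false).mem_iff.mp h
  exact (PySem.List.mem_pyRange_one).mp this

-- pvAddNbr adds at most v somewhere
theorem pvAddNbr_mem (m : Array (List Int)) (k w : Int) (u : Nat) (v : Int)
    (hv : v ∈ (pvAddNbr m k w).getD u []) : v ∈ m.getD u [] ∨ v = w := by
  unfold pvAddNbr at hv
  by_cases hc : (m.getD k.toNat []).contains w
  · rw [if_pos hc] at hv; exact Or.inl hv
  · rw [if_neg hc] at hv
    rw [pvGetD_set] at hv
    by_cases hcase : u = k.toNat ∧ k.toNat < m.size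
    · rw [if_pos hcase] at hv
      rcases List.mem_append.mp hv with h | h
      · exact Or.inl (hcase.1 ▸ h)
      · exact Or.inr (List.mem_singleton.mp h)
    · rw [if_neg hcase] at hv; exact Or.inl hv

-- nbrs built by pvBuildNbrs only contains faces in [0, num_faces)
theorem pvBuildNbrs_mem (edge_face_pairs : List (Int × Int)) (num_faces : Int)
    (u : Nat) (v : Int) (hv : v ∈ (pvBuildNbrs edge_face_pairs num_faces).getD u []) :
    0 ≤ v ∧ v < num_faces := by
  unfold pvBuildNbrs at hv
  have aux : ∀ (l : List (Int × Int)) (m : Array (List Int)),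
      (∀ u v, v ∈ m.getD u [] → 0 ≤ v ∧ v < num_faces) →
      ∀ u v, v ∈ (l.foldl (fun m p =>
        if 0 ≤ p.1 ∧ p.1 < num_faces ∧ 0 ≤ p.2 ∧ p.2 < num_faces ∧ p.1 ≠ p.2
        then pvAddNbr (pvAddNbr m p.1 p.2) p.2 p.1 else m) m).getD u [] →
      0 ≤ v ∧ v < num_faces := by
    intro l
    induction l with
    | nil => intro m hm u v h; exact hm u v h
    | cons p l ihl =>
      intro m hm u v h
      rw [List.foldl_cons] at h
      refine ihl _ ?_ u v h
      intro u' v' h'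
      simp only at h'
      by_cases hp : 0 ≤ p.1 ∧ p.1 < num_faces ∧ 0 ≤ p.2 ∧ p.2 < num_faces ∧ p.1 ≠ p.2
      · rw [if_pos hp] at h'
        rcases pvAddNbr_mem _ _ _ _ _ h' with h2 | hv2
        · rcases pvAddNbr_mem _ _ _ _ _ h2 with h3 | hv3
          · exact hm _ _ h3
          · exact hv3 ▸ ⟨hp.2.2.1, hp.2.2.2.1⟩
        · exact hv2 ▸ ⟨hp.1, hp.2.1⟩
      · rw [if_neg hp] at h'
        exact hm _ _ h'
  refine aux edge_face_pairs (Array.replicate num_faces.toNat []) ?_ u v hv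
  intro u' v' h'
  rw [pvReplicate_getD _ _ _ _ rfl] at h'
  cases h'

-- each neighbor list stays duplicate-free
theorem pvAddNbr_nodup (m : Array (List Int)) (k w : Int)
    (h : ∀ u, (m.getD u []).Nodup) : ∀ u, ((pvAddNbr m k w).getD u []).Nodup := by
  intro u
  unfold pvAddNbr
  by_cases hc : (m.getD k.toNat []).contains w
  · rw [if_pos hc]; exact h u
  · rw [if_neg hc]
    rw [pvGetD_set]
    by_cases hcase : u = k.toNat ∧ k.toNat < m.size
    · rw [if_pos hcase]
      have hw : w ∉ m.getD k.toNat [] := by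
        intro hmem
        exact hc (List.contains_iff_mem.mpr hmem)
      refine List.Nodup.append (h k.toNat) (List.nodup_singleton w) ?_
      simpa [List.disjoint_singleton] using hw
    · rw [if_neg hcase]; exact h u

theorem pvBuildNbrs_nodup (edge_face_pairs : List (Int × Int)) (num_faces : Int) :
    ∀ u, ((pvBuildNbrs edge_face_pairs num_faces).getD u []).Nodup := by
  unfold pvBuildNbrs
  have aux : ∀ (l : List (Int × Int)) (m : Array (List Int)),
      (∀ u, (m.getD u []).Nodup) →
      ∀ u, ((l.foldl (fun m p =>
        if 0 ≤ p.1 ∧ p.1 < num_faces ∧ 0 ≤ p.2 ∧ p.2 < num_faces ∧ p.1 ≠ p.2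
        then pvAddNbr (pvAddNbr m p.1 p.2) p.2 p.1 else m) m).getD u []).Nodup := by
    intro l
    induction l with
    | nil => intro m hm u; exact hm u
    | cons p l ihl =>
      intro m hm u
      rw [List.foldl_cons]
      refine ihl _ ?_ u
      intro u'
      by_cases hp : 0 ≤ p.1 ∧ p.1 < num_faces ∧ 0 ≤ p.2 ∧ p.2 < num_faces ∧ p.1 ≠ p.2
      · rw [if_pos hp]
        exact pvAddNbr_nodup _ _ _ (pvAddNbr_nodup _ _ _ hm) u'
      · rw [if_neg hp]; exact hm u'
  intro u
  refine aux edge_face_pairs (Array.replicate num_faces.toNat []) ?_ u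
  intro u'
  rw [pvReplicate_getD _ _ _ _ rfl]
  exact List.nodup_nil

theorem pvAddNbr_size (m : Array (List Int)) (k v : Int) :
    (pvAddNbr m k v).size = m.size := by
  unfold pvAddNbr
  split
  · rfl
  · exact Array.size_setIfInBounds

-- ---------- B-dict ↔ A-array correspondence ----------

theorem pvAdjB_getD (edge_face_pairs : List (Int × Int)) (num_faces : Int) :
    ∀ u : Int, 0 ≤ u → u < num_faces →
      (pvAdjB edge_face_pairs num_faces).getD u []
        = (pvBuildNbrs edge_face_pairs num_faces).getD u.toNat [] := by
  have step : ∀ (d : PySem.Dict Int (PySem.Set Int)) (m : Array (List Int)),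
      m.size = num_faces.toNat →
      (∀ u : Int, 0 ≤ u → u < num_faces → d.getD u [] = m.getD u.toNat []) →
      ∀ (a b : Int), 0 ≤ a → a < num_faces →
      ∀ u : Int, 0 ≤ u → u < num_faces →
        (d.insert a (PySem.Set.add (d.getD a []) b)).getD u []
          = (pvAddNbr m a b).getD u.toNat [] := by
    intro d m hsz hinv a b ha0 han u hu0 hun
    rw [PySem.Dict.getD_insert]
    unfold pvAddNbr
    by_cases hua : u = a
    · subst hua
      rw [if_pos rfl, hinv u hu0 hun]
      simp only [PySem.Set.add, PySem.Set.contains_eq_listContains]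
      by_cases hc : (m.getD u.toNat []).contains b
      · rw [if_pos hc, if_pos hc]
      · rw [if_neg hc, if_neg hc, pvGetD_set,
          if_pos (show u.toNat = u.toNat ∧ u.toNat < m.size from ⟨rfl, by omega⟩)]
    · rw [if_neg hua, hinv u hu0 hun]
      by_cases hc : (m.getD a.toNat []).contains b
      · rw [if_pos hc]
      · rw [if_neg hc, pvGetD_set]
        rw [if_neg (by intro hx; exact hua (by omega))]
  unfold pvAdjB pvBuildNbrs
  have aux : ∀ (l : List (Int × Int)) (d : PySem.Dict Int (PySem.Set Int)) (m : Array (List Int)),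
      m.size = num_faces.toNat →
      (∀ u : Int, 0 ≤ u → u < num_faces → d.getD u [] = m.getD u.toNat []) →
      ∀ u : Int, 0 ≤ u → u < num_faces →
      (l.foldl (fun d p =>
        if 0 ≤ p.1 ∧ p.1 < num_faces ∧ 0 ≤ p.2 ∧ p.2 < num_faces ∧ p.1 ≠ p.2 then
          let d1 := d.insert p.1 (PySem.Set.add (d.getD p.1 []) p.2)
          d1.insert p.2 (PySem.Set.add (d1.getD p.2 []) p.1)
        else d) d).getD u []
      = (l.foldl (fun m p =>
        if 0 ≤ p.1 ∧ p.1 < num_faces ∧ 0 ≤ p.2 ∧ p.2 < num_faces ∧ p.1 ≠ p.2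
        then pvAddNbr (pvAddNbr m p.1 p.2) p.2 p.1 else m) m).getD u.toNat [] := by
    intro l
    induction l with
    | nil => intro d m _ hinv u hu0 hun; exact hinv u hu0 hun
    | cons p l ihl =>
      intro d m hsz hinv u hu0 hun
      rw [List.foldl_cons, List.foldl_cons]
      by_cases hp : 0 ≤ p.1 ∧ p.1 < num_faces ∧ 0 ≤ p.2 ∧ p.2 < num_faces ∧ p.1 ≠ p.2
      · simp only [if_pos hp]
        refine ihl _ _ ?_ ?_ u hu0 hun
        · rw [pvAddNbr_size, pvAddNbr_size]; exact hsz
        · intro w hw0 hwn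
          exact step _ _ (by rw [pvAddNbr_size]; exact hsz)
            (step d m hsz hinv p.1 p.2 hp.1 hp.2.1) p.2 p.1 hp.2.2.1 hp.2.2.2.1 w hw0 hwn
      · simp only [if_neg hp]
        exact ihl _ _ hsz hinv u hu0 hun
  intro u hu0 hun
  refine aux edge_face_pairs PySem.Dict.empty (Array.replicate num_faces.toNat []) (by simp) ?_ u hu0 hun
  intro w _ _
  rw [PySem.Dict.getD_empty, pvReplicate_getD _ _ _ _ rfl]

theorem pvAdjB_keys_nodup (edge_face_pairs : List (Int × Int)) (num_faces : Int) :
    (pvAdjB edge_face_pairs num_faces).keys.Nodup := by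
  unfold pvAdjB
  have aux : ∀ (l : List (Int × Int)) (d : PySem.Dict Int (PySem.Set Int)),
      d.keys.Nodup →
      (l.foldl (fun d p =>
        if 0 ≤ p.1 ∧ p.1 < num_faces ∧ 0 ≤ p.2 ∧ p.2 < num_faces ∧ p.1 ≠ p.2 then
          let d1 := d.insert p.1 (PySem.Set.add (d.getD p.1 []) p.2)
          d1.insert p.2 (PySem.Set.add (d1.getD p.2 []) p.1)
        else d) d).keys.Nodup := by
    intro l
    induction l with
    | nil => intro d hd; exact hd
    | cons p l ihl =>
      intro d hd
      rw [List.foldl_cons]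
      refine ihl _ ?_
      by_cases hp : 0 ≤ p.1 ∧ p.1 < num_faces ∧ 0 ≤ p.2 ∧ p.2 < num_faces ∧ p.1 ≠ p.2
      · simp only [if_pos hp]
        exact PySem.Dict.nodup_keys_insert _ _ _ (PySem.Dict.nodup_keys_insert _ _ _ hd)
      · simp only [if_neg hp]; exact hd
  exact aux edge_face_pairs PySem.Dict.empty PySem.Dict.nodup_keys_empty

-- dict comprehension {p.1: f p for p in l}: lookup of a missing / present key
theorem pvFoldInsert_getD_not_mem {β ν : Type} (f : Int × β → ν)
    (l : List (Int × β)) (d0 : PySem.Dict Int ν) (x : Int) (dflt : ν)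
    (hx : x ∉ l.map Prod.fst) :
    (l.foldl (fun d p => d.insert p.1 (f p)) d0).getD x dflt = d0.getD x dflt := by
  induction l generalizing d0 with
  | nil => rfl
  | cons p l ihl =>
    rw [List.map_cons] at hx
    rw [List.foldl_cons, ihl _ (fun h => hx (List.mem_cons_of_mem _ h))]
    exact PySem.Dict.getD_insert_of_ne _ _ _ (fun h => hx (h ▸ List.mem_cons_self))

theorem pvFoldInsert_getD_mem {β ν : Type} (f : Int × β → ν)
    (l : List (Int × β)) (d0 : PySem.Dict Int ν) (x : Int) (s : β) (dflt : ν)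
    (hnd : (l.map Prod.fst).Nodup) (hmem : (x, s) ∈ l) :
    (l.foldl (fun d p => d.insert p.1 (f p)) d0).getD x dflt = f (x, s) := by
  induction l generalizing d0 with
  | nil => cases hmem
  | cons p l ihl =>
    rw [List.map_cons, List.nodup_cons] at hnd
    rw [List.foldl_cons]
    rcases List.mem_cons.mp hmem with hmem | hmem
    · subst hmem
      rw [pvFoldInsert_getD_not_mem f l _ x dflt (by simpa using hnd.1)]
      rw [PySem.Dict.getD_insert, if_pos rfl]
    · exact ihl _ hnd.2 hmem

theorem pvDegB_getD (adj : PySem.Dict Int (PySem.Set Int)) (hnd : adj.keys.Nodup) (x : Int) :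
    (pvDegB adj).getD x 0 = ((adj.getD x []).length : Int) := by
  unfold pvDegB
  have hkeys : adj.items.map Prod.fst = adj.keys := rfl
  by_cases hc : adj.contains x
  · have hx : x ∈ adj.keys := (PySem.Dict.contains_iff_mem_keys _ _).mp hc
    have hmem : (x, adj.getD x []) ∈ adj.items := by
      rw [PySem.Dict.items_eq_map_keys adj hnd ([] : PySem.Set Int)]
      exact List.mem_map_of_mem hx
    exact pvFoldInsert_getD_mem (fun p => (p.2.length : Int)) adj.items PySem.Dict.empty x
      (adj.getD x []) 0 (hkeys ▸ hnd) hmem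
  · have hx : x ∉ adj.items.map Prod.fst := by
      rw [hkeys]
      intro h
      exact absurd ((PySem.Dict.contains_iff_mem_keys _ _).mpr h) (by simpa using hc)
    rw [pvFoldInsert_getD_not_mem (fun p => (p.2.length : Int)) adj.items _ x 0 hx,
      PySem.Dict.getD_empty,
      PySem.Dict.getD_of_not_contains adj ([] : PySem.Set Int) (by simpa using hc)]
    rfl

theorem pvDescB_getD (adj : PySem.Dict Int (PySem.Set Int)) (deg : PySem.Dict Int Int)
    (hnd : adj.keys.Nodup) (u : Int) :
    (pvDescB adj deg).getD u []
      = PySem.List.sorted2 (adj.getD u []) (fun x => deg.getD x 0) (fun x => x) true := by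
  unfold pvDescB
  have hkeys : adj.items.map Prod.fst = adj.keys := rfl
  by_cases hc : adj.contains u
  · have hu : u ∈ adj.keys := (PySem.Dict.contains_iff_mem_keys _ _).mp hc
    have hmem : (u, adj.getD u []) ∈ adj.items := by
      rw [PySem.Dict.items_eq_map_keys adj hnd ([] : PySem.Set Int)]
      exact List.mem_map_of_mem hu
    exact pvFoldInsert_getD_mem
      (fun p => PySem.List.sorted2 p.2 (fun x => deg.getD x 0) (fun x => x) true)
      adj.items PySem.Dict.empty u (adj.getD u []) [] (hkeys ▸ hnd) hmem
  · have hu : u ∉ adj.items.map Prod.fst := by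
      rw [hkeys]
      intro h
      exact absurd ((PySem.Dict.contains_iff_mem_keys _ _).mpr h) (by simpa using hc)
    rw [pvFoldInsert_getD_not_mem
        (fun p => PySem.List.sorted2 p.2 (fun x => deg.getD x 0) (fun x => x) true)
        adj.items _ u [] hu,
      PySem.Dict.getD_empty,
      PySem.Dict.getD_of_not_contains adj ([] : PySem.Set Int) (by simpa using hc)]
    rfl

theorem pvDegB_eq_degA (edge_face_pairs : List (Int × Int)) (num_faces : Int)
    (x : Int) (hx0 : 0 ≤ x) (hxn : x < num_faces) :
    (pvDegB (pvAdjB edge_face_pairs num_faces)).getD x 0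
      = (pvDegs (pvBuildNbrs edge_face_pairs num_faces)).getD x.toNat 0 := by
  rw [pvDegB_getD _ (pvAdjB_keys_nodup edge_face_pairs num_faces) x,
    pvAdjB_getD edge_face_pairs num_faces x hx0 hxn, pvDegs_getD]

-- B's presorted descending list is the reverse of A's ascending sort of the same neighbors
theorem pvDescB_eq (edge_face_pairs : List (Int × Int)) (num_faces : Int)
    (u : Int) (hu0 : 0 ≤ u) (hun : u < num_faces) :
    (pvDescB (pvAdjB edge_face_pairs num_faces) (pvDegB (pvAdjB edge_face_pairs num_faces))).getD u []
      = (pvSortNbrs (pvDegs (pvBuildNbrs edge_face_pairs num_faces))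
          ((pvBuildNbrs edge_face_pairs num_faces).getD u.toNat [])).reverse := by
  rw [pvDescB_getD _ _ (pvAdjB_keys_nodup edge_face_pairs num_faces) u,
    pvAdjB_getD edge_face_pairs num_faces u hu0 hun]
  set l := (pvBuildNbrs edge_face_pairs num_faces).getD u.toNat [] with hl
  have hmeml : ∀ v ∈ l, 0 ≤ v ∧ v < num_faces := fun v hv =>
    pvBuildNbrs_mem edge_face_pairs num_faces u.toNat v hv
  have hndl : l.Nodup := pvBuildNbrs_nodup edge_face_pairs num_faces u.toNat
  have hperm : (pvSortNbrs (pvDegs (pvBuildNbrs edge_face_pairs num_faces)) l).Perm l :=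
    PySem.List.sorted2_perm l _ _ false
  have hndasc : (pvSortNbrs (pvDegs (pvBuildNbrs edge_face_pairs num_faces)) l).Nodup :=
    hperm.nodup_iff.mpr hndl
  have hle := pvSorted2_pairwise l
    (fun x => (pvDegs (pvBuildNbrs edge_face_pairs num_faces)).getD x.toNat 0)
  have hlt := pvPairwise_lt_of_le_nodup _ _ hle hndasc
  have hltB : (pvSortNbrs (pvDegs (pvBuildNbrs edge_face_pairs num_faces)) l).Pairwise
      (fun a b => toLex ((pvDegB (pvAdjB edge_face_pairs num_faces)).getD a 0, a)
        < toLex ((pvDegB (pvAdjB edge_face_pairs num_faces)).getD b 0, b)) := by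
    refine hlt.imp_of_mem ?_
    intro a b ha hb hab
    have ha' := hmeml a (hperm.mem_iff.mp ha)
    have hb' := hmeml b (hperm.mem_iff.mp hb)
    rwa [pvDegB_eq_degA edge_face_pairs num_faces a ha'.1 ha'.2,
      pvDegB_eq_degA edge_face_pairs num_faces b hb'.1 hb'.2]
  refine pvSorted2_rev_eq_of_perm_of_pairwise_gt _ _ _ ?_ ?_
  · exact ((pvSortNbrs (pvDegs (pvBuildNbrs edge_face_pairs num_faces)) l).reverse_perm).trans hperm
  · exact (List.pairwise_reverse).mpr hltB

-- both programs enumerate the same seed list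
theorem pvSeedsB_eq (edge_face_pairs : List (Int × Int)) (num_faces : Int) :
    PySem.List.sorted2 (PySem.List.pyRange 0 num_faces 1)
        (fun x => -((pvDegB (pvAdjB edge_face_pairs num_faces)).getD x 0)) (fun x => x) false
      = pvSeeds (pvDegs (pvBuildNbrs edge_face_pairs num_faces)) num_faces := by
  unfold pvSeeds
  have hperm : (PySem.List.sorted2 (PySem.List.pyRange 0 num_faces 1)
      (fun x => -((pvDegs (pvBuildNbrs edge_face_pairs num_faces)).getD x.toNat 0)) (fun x => x)
      false).Perm (PySem.List.pyRange 0 num_faces 1) :=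
    PySem.List.sorted2_perm _ _ _ false
  have hnd : (PySem.List.sorted2 (PySem.List.pyRange 0 num_faces 1)
      (fun x => -((pvDegs (pvBuildNbrs edge_face_pairs num_faces)).getD x.toNat 0)) (fun x => x)
      false).Nodup := hperm.nodup_iff.mpr (PySem.List.nodup_pyRange_one 0 num_faces)
  have hle := pvSorted2_pairwise (PySem.List.pyRange 0 num_faces 1)
    (fun x => -((pvDegs (pvBuildNbrs edge_face_pairs num_faces)).getD x.toNat 0))
  have hlt := pvPairwise_lt_of_le_nodup _ _ hle hnd
  refine pvSorted2_eq_of_perm_of_pairwise_lt _ _ _ hperm ?_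
  refine hlt.imp_of_mem ?_
  intro a b ha hb hab
  have ha' := PySem.List.mem_pyRange_one.mp (hperm.mem_iff.mp ha)
  have hb' := PySem.List.mem_pyRange_one.mp (hperm.mem_iff.mp hb)
  rwa [pvDegB_eq_degA edge_face_pairs num_faces a ha'.1 ha'.2,
    pvDegB_eq_degA edge_face_pairs num_faces b hb'.1 hb'.2]

-- filtering commutes with A's neighbor sort (distinct elements, injective tuple key)
theorem pvFilter_sortNbrs (deg : Array Int) (l : List Int) (hnd : l.Nodup) (q : Int → Bool) :
    (pvSortNbrs deg l).filter q = pvSortNbrs deg (l.filter q) := by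
  have hperm : (pvSortNbrs deg l).Perm l := PySem.List.sorted2_perm l _ _ false
  have hndasc : (pvSortNbrs deg l).Nodup := hperm.nodup_iff.mpr hnd
  have hle := pvSorted2_pairwise l (fun x => deg.getD x.toNat 0)
  have hlt := pvPairwise_lt_of_le_nodup _ _ hle hndasc
  exact (pvSorted2_eq_of_perm_of_pairwise_lt (l.filter q) ((pvSortNbrs deg l).filter q) _
    (hperm.filter q) (hlt.sublist List.filter_sublist)).symm

-- ---------- the middle loop (proof-layer only): A's dfs as an explicit-stack loop over A's state ----------

def pvLoopB (nbrs : Array (List Int)) (deg : Array Int) :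
    Nat → List Int → (Array Bool × Array Int) → (Array Bool × Array Int)
  | _, [], st => st
  | f, u :: rest, st =>
    if st.1.getD u.toNat false then pvLoopB nbrs deg f rest st
    else match f with
      | 0 => st
      | f+1 =>
        let vis := st.1.setIfInBounds u.toNat true
        let ord := st.2.push u
        let uns := pvSortNbrs deg ((nbrs.getD u.toNat []).filter (fun v => !(vis.getD v.toNat false)))
        pvLoopB nbrs deg f (uns ++ rest) (vis, ord)
  termination_by f stack _ => (f, stack.length)

-- number of unvisited faces among 0 .. n-1
def pvUC (n : Int) (vis : Array Bool) : Nat :=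
  (List.range n.toNat).countP (fun k => !(vis.getD k false))

theorem pvCountP_mark (vis : Array Bool) (i : Nat) (hi : i < vis.size)
    (hv : vis.getD i false = false) :
    ∀ (l : List Nat), l.Nodup → i ∈ l →
    l.countP (fun k => !((vis.setIfInBounds i true).getD k false)) + 1
      = l.countP (fun k => !(vis.getD k false)) := by
  intro l
  induction l with
  | nil => intro _ h; cases h
  | cons a t ih =>
    intro hnd hx
    rcases List.nodup_cons.mp hnd with ⟨hat, hndt⟩
    by_cases hax : a = i
    · have hit : i ∉ t := hax ▸ hat
      have hcongr : t.countP (fun k => !((vis.setIfInBounds i true).getD k false))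
          = t.countP (fun k => !(vis.getD k false)) := by
        apply List.countP_congr
        intro y hy
        have hyi : y ≠ i := fun h => hit (h ▸ hy)
        rw [pvGetD_set]
        simp [hyi]
      simp only [List.countP_cons, hcongr]
      rw [pvGetD_set]
      simp [hax, hv, hi]
    · have hit : i ∈ t := by
        cases hx with
        | head => exact absurd rfl hax
        | tail _ h => exact h
      have hrec := ih hndt hit
      simp only [List.countP_cons]
      rw [pvGetD_set]
      have : ¬(a = i ∧ i < vis.size) := fun h => hax h.1
      rw [if_neg this]
      omega

theorem pvUC_le (n : Int) (vis : Array Bool) : pvUC n vis ≤ n.toNat := by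
  have h := List.countP_le_length (p := fun k => !(vis.getD k false)) (l := List.range n.toNat)
  unfold pvUC
  simpa using h

theorem pvUC_mark (n : Int) (vis : Array Bool) (x : Int)
    (hx0 : 0 ≤ x) (hxn : x < n) (hs : x.toNat < vis.size)
    (hv : vis.getD x.toNat false = false) :
    pvUC n (vis.setIfInBounds x.toNat true) + 1 = pvUC n vis := by
  exact pvCountP_mark vis x.toNat hs hv (List.range n.toNat) (List.nodup_range)
    (List.mem_range.mpr (by omega))

theorem pvUC_pos (n : Int) (vis : Array Bool) (x : Int)
    (hx0 : 0 ≤ x) (hxn : x < n) (hs : x.toNat < vis.size)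
    (hv : vis.getD x.toNat false = false) : 1 ≤ pvUC n vis := by
  have := pvUC_mark n vis x hx0 hxn hs hv
  omega

theorem pvUC_mono (n : Int) (vis vis' : Array Bool)
    (h : ∀ k, vis.getD k false = true → vis'.getD k false = true) :
    pvUC n vis' ≤ pvUC n vis := by
  apply List.countP_mono_left
  intro k _ hk
  simp only [Bool.not_eq_eq_eq_not, Bool.not_true] at *
  cases hvk : vis.getD k false with
  | false => rfl
  | true => rw [h k hvk] at hk; exact hk

-- dfsA only turns visited entries on, and preserves the arrays' sizes
theorem pvDfsA_mono (nbrs : Array (List Int)) (deg : Array Int) :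
    ∀ (f : Nat) (u : Int) (st : Array Bool × Array Int),
    (pvDfsA nbrs deg f u st).1.size = st.1.size ∧
    (∀ k, st.1.getD k false = true → (pvDfsA nbrs deg f u st).1.getD k false = true) := by
  intro f
  induction f with
  | zero => intro u st; exact ⟨rfl, fun k h => h⟩
  | succ f ih =>
    intro u st
    have hfold : ∀ (cs : List Int) (s : Array Bool × Array Int),
        ((cs.foldl (fun s v => if s.1.getD v.toNat false then s else pvDfsA nbrs deg f v s) s).1.size
          = s.1.size) ∧
        (∀ k, s.1.getD k false = true →
          (cs.foldl (fun s v => if s.1.getD v.toNat false then s else pvDfsA nbrs deg f v s) s).1.getD k false = true) := by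
      intro cs
      induction cs with
      | nil => intro s; exact ⟨rfl, fun k h => h⟩
      | cons c cs ihc =>
        intro s
        rw [List.foldl_cons]
        by_cases hc : s.1.getD c.toNat false
        · rw [if_pos hc]; exact ihc s
        · rw [if_neg hc]
          obtain ⟨hsz1, hmono1⟩ := ih c s
          obtain ⟨hsz2, hmono2⟩ := ihc (pvDfsA nbrs deg f c s)
          exact ⟨hsz2.trans hsz1, fun k h => hmono2 k (hmono1 k h)⟩
    have h := hfold
      (pvSortNbrs deg ((nbrs.getD u.toNat []).filter
        (fun v => !((st.1.setIfInBounds u.toNat true).getD v.toNat false))))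
      (st.1.setIfInBounds u.toNat true, st.2.push u)
    constructor
    · show (pvDfsA nbrs deg (f+1) u st).1.size = st.1.size
      rw [pvDfsA]
      exact h.1.trans Array.size_setIfInBounds
    · intro k hk
      show (pvDfsA nbrs deg (f+1) u st).1.getD k false = true
      rw [pvDfsA]
      apply h.2
      rw [pvGetD_set]
      by_cases hcase : k = u.toNat ∧ u.toNat < st.1.size
      · rw [if_pos hcase]
      · rw [if_neg hcase]; exact hk

-- the inner foldl of a dfs level, same monotonicity
theorem pvFoldStep_mono (nbrs : Array (List Int)) (deg : Array Int) (f : Nat) :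
    ∀ (cs : List Int) (s : Array Bool × Array Int),
    ((cs.foldl (fun s v => if s.1.getD v.toNat false then s else pvDfsA nbrs deg f v s) s).1.size
      = s.1.size) ∧
    (∀ k, s.1.getD k false = true →
      (cs.foldl (fun s v => if s.1.getD v.toNat false then s else pvDfsA nbrs deg f v s) s).1.getD k false = true) := by
  intro cs
  induction cs with
  | nil => intro s; exact ⟨rfl, fun k h => h⟩
  | cons c cs ihc =>
    intro s
    rw [List.foldl_cons]
    by_cases hc : s.1.getD c.toNat false
    · rw [if_pos hc]; exact ihc s
    · rw [if_neg hc]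
      obtain ⟨hsz1, hmono1⟩ := pvDfsA_mono nbrs deg f c s
      obtain ⟨hsz2, hmono2⟩ := ihc (pvDfsA nbrs deg f c s)
      exact ⟨hsz2.trans hsz1, fun k h => hmono2 k (hmono1 k h)⟩

-- equation lemmas for the well-founded pvLoopB
theorem pvLoopB_nil (nbrs : Array (List Int)) (deg : Array Int) (f : Nat)
    (st : Array Bool × Array Int) : pvLoopB nbrs deg f [] st = st := by
  rw [pvLoopB]

theorem pvLoopB_cons_visited (nbrs : Array (List Int)) (deg : Array Int) (f : Nat)
    (u : Int) (rest : List Int) (st : Array Bool × Array Int)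
    (h : st.1.getD u.toNat false = true) :
    pvLoopB nbrs deg f (u :: rest) st = pvLoopB nbrs deg f rest st := by
  rw [pvLoopB.eq_def]; simp [h]

theorem pvLoopB_cons_unvisited (nbrs : Array (List Int)) (deg : Array Int) (f : Nat)
    (u : Int) (rest : List Int) (st : Array Bool × Array Int)
    (h : st.1.getD u.toNat false = false) :
    pvLoopB nbrs deg (f+1) (u :: rest) st =
      pvLoopB nbrs deg f
        (pvSortNbrs deg ((nbrs.getD u.toNat []).filter
          (fun v => !((st.1.setIfInBounds u.toNat true).getD v.toNat false))) ++ rest)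
        (st.1.setIfInBounds u.toNat true, st.2.push u) := by
  rw [pvLoopB.eq_def]; simp [h]

theorem pvLoopB_zero_unvisited (nbrs : Array (List Int)) (deg : Array Int)
    (u : Int) (rest : List Int) (st : Array Bool × Array Int)
    (h : st.1.getD u.toNat false = false) :
    pvLoopB nbrs deg 0 (u :: rest) st = st := by
  rw [pvLoopB.eq_def]; simp [h]

-- fuel irrelevance of the iterative loop, given enough fuel for the unvisited faces
theorem pvLoopB_fuel (nbrs : Array (List Int)) (deg : Array Int) (n : Int)
    (hn : ∀ (u : Nat) (v : Int), v ∈ nbrs.getD u [] → 0 ≤ v ∧ v < n) :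
    ∀ (K : Nat) (stack : List Int) (st : Array Bool × Array Int) (f g : Nat),
    st.1.size = n.toNat →
    pvUC n st.1 ≤ K → pvUC n st.1 ≤ f → pvUC n st.1 ≤ g →
    (∀ y ∈ stack, 0 ≤ y ∧ y < n) →
    pvLoopB nbrs deg f stack st = pvLoopB nbrs deg g stack st := by
  intro K
  induction K with
  | zero =>
    intro stack
    induction stack with
    | nil => intro st f g _ _ _ _ _; rw [pvLoopB_nil, pvLoopB_nil]
    | cons u rest ihs =>
      intro st f g hsz hK hf hg hstk
      have hur := hstk u List.mem_cons_self
      have hu : st.1.getD u.toNat false = true := by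
        by_contra hne
        have := pvUC_pos n st.1 u hur.1 hur.2 (by omega) (by simpa using hne)
        omega
      rw [pvLoopB_cons_visited _ _ _ _ _ _ hu, pvLoopB_cons_visited _ _ _ _ _ _ hu]
      exact ihs st f g hsz hK hf hg (fun y hy => hstk y (List.mem_cons_of_mem _ hy))
  | succ K ihK =>
    intro stack
    induction stack with
    | nil => intro st f g _ _ _ _ _; rw [pvLoopB_nil, pvLoopB_nil]
    | cons u rest ihs =>
      intro st f g hsz hK hf hg hstk
      by_cases hu : st.1.getD u.toNat false = true
      · rw [pvLoopB_cons_visited _ _ _ _ _ _ hu, pvLoopB_cons_visited _ _ _ _ _ _ hu]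
        exact ihs st f g hsz hK hf hg (fun y hy => hstk y (List.mem_cons_of_mem _ hy))
      · have hu' : st.1.getD u.toNat false = false := by simpa using hu
        have hur := hstk u List.mem_cons_self
        have hmark := pvUC_mark n st.1 u hur.1 hur.2 (by omega) hu'
        obtain ⟨f', rfl⟩ : ∃ f', f = f' + 1 := by
          cases f with
          | zero => omega
          | succ f' => exact ⟨f', rfl⟩
        obtain ⟨g', rfl⟩ : ∃ g', g = g' + 1 := by
          cases g with
          | zero => omega
          | succ g' => exact ⟨g', rfl⟩
        rw [pvLoopB_cons_unvisited _ _ _ _ _ _ hu', pvLoopB_cons_unvisited _ _ _ _ _ _ hu']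
        apply ihK
        · show (st.1.setIfInBounds u.toNat true).size = n.toNat
          rw [Array.size_setIfInBounds]; exact hsz
        · show pvUC n (st.1.setIfInBounds u.toNat true) ≤ K; omega
        · show pvUC n (st.1.setIfInBounds u.toNat true) ≤ f'; omega
        · show pvUC n (st.1.setIfInBounds u.toNat true) ≤ g'; omega
        · intro y hy
          rcases List.mem_append.mp hy with h | h
          · have := (pvSortNbrs_mem deg _ y).mp h
            exact hn u.toNat y (List.mem_filter.mp this).1
          · exact hstk y (List.mem_cons_of_mem _ h)

-- the crux: popping x is A's guarded dfs step
theorem pvM (nbrs : Array (List Int)) (deg : Array Int) (n : Int)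
    (hn : ∀ (u : Nat) (v : Int), v ∈ nbrs.getD u [] → 0 ≤ v ∧ v < n) :
    ∀ (K : Nat) (st : Array Bool × Array Int) (x : Int) (tail : List Int) (f : Nat),
    st.1.size = n.toNat →
    pvUC n st.1 ≤ K → pvUC n st.1 ≤ f → 0 ≤ x → x < n →
    (∀ y ∈ tail, 0 ≤ y ∧ y < n) →
    pvLoopB nbrs deg f (x :: tail) st =
      pvLoopB nbrs deg f tail
        (if st.1.getD x.toNat false then st else pvDfsA nbrs deg f x st) := by
  intro K
  induction K with
  | zero =>
    intro st x tail f hsz hK hf hx0 hxn htail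
    have hx : st.1.getD x.toNat false = true := by
      by_contra hne
      have := pvUC_pos n st.1 x hx0 hxn (by omega) (by simpa using hne)
      omega
    rw [pvLoopB_cons_visited _ _ _ _ _ _ hx, if_pos hx]
  | succ K ihK =>
    intro st x tail f hsz hK hf hx0 hxn htail
    by_cases hx : st.1.getD x.toNat false = true
    · rw [pvLoopB_cons_visited _ _ _ _ _ _ hx, if_pos hx]
    · have hx' : st.1.getD x.toNat false = false := by simpa using hx
      rw [if_neg hx]
      have hmark := pvUC_mark n st.1 x hx0 hxn (by omega) hx'
      obtain ⟨f', rfl⟩ : ∃ f', f = f' + 1 := by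
        cases f with
        | zero => omega
        | succ f' => exact ⟨f', rfl⟩
      rw [pvLoopB_cons_unvisited _ _ _ _ _ _ hx']
      have huns : ∀ c ∈ pvSortNbrs deg ((nbrs.getD x.toNat []).filter
          (fun v => !((st.1.setIfInBounds x.toNat true).getD v.toNat false))), 0 ≤ c ∧ c < n := by
        intro c hc
        have := (pvSortNbrs_mem deg _ c).mp hc
        exact hn x.toNat c (List.mem_filter.mp this).1
      have Mlist : ∀ (cs : List Int), (∀ c ∈ cs, 0 ≤ c ∧ c < n) →
          ∀ (s2 : Array Bool × Array Int), s2.1.size = n.toNat →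
          pvUC n s2.1 ≤ K → pvUC n s2.1 ≤ f' →
          pvLoopB nbrs deg f' (cs ++ tail) s2 = pvLoopB nbrs deg f' tail
            (cs.foldl (fun s v => if s.1.getD v.toNat false then s else pvDfsA nbrs deg f' v s) s2) := by
        intro cs
        induction cs with
        | nil => intro _ s2 _ _ _; simp
        | cons c cs ihc =>
          intro hcr s2 h2sz h2K h2f
          have hcrh := hcr c List.mem_cons_self
          have step1 := ihK s2 c (cs ++ tail) f' h2sz h2K h2f hcrh.1 hcrh.2
            (by
              intro y hy
              rcases List.mem_append.mp hy with h | h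
              · exact hcr y (List.mem_cons_of_mem _ h)
              · exact htail y h)
          rw [List.cons_append, step1, List.foldl_cons]
          have hstep_sz : (if s2.1.getD c.toNat false then s2 else pvDfsA nbrs deg f' c s2).1.size
              = n.toNat := by
            by_cases hc2 : s2.1.getD c.toNat false = true
            · rw [if_pos hc2]; exact h2sz
            · rw [if_neg hc2]
              exact (pvDfsA_mono nbrs deg f' c s2).1.trans h2sz
          have h3 : pvUC n (if s2.1.getD c.toNat false then s2 else pvDfsA nbrs deg f' c s2).1
              ≤ pvUC n s2.1 := by
            by_cases hc2 : s2.1.getD c.toNat false = true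
            · rw [if_pos hc2]
            · rw [if_neg hc2]
              exact pvUC_mono n s2.1 _ (pvDfsA_mono nbrs deg f' c s2).2
          exact ihc (fun y hy => hcr y (List.mem_cons_of_mem _ hy)) _
            hstep_sz (le_trans h3 h2K) (le_trans h3 h2f)
      have hsz' : (st.1.setIfInBounds x.toNat true).size = n.toNat := by
        rw [Array.size_setIfInBounds]; exact hsz
      have hstK : pvUC n (st.1.setIfInBounds x.toNat true) ≤ K := by omega
      have hstf : pvUC n (st.1.setIfInBounds x.toNat true) ≤ f' := by omega
      rw [Mlist _ huns (st.1.setIfInBounds x.toNat true, st.2.push x) hsz' hstK hstf]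
      have hdfs : pvDfsA nbrs deg (f' + 1) x st =
          (pvSortNbrs deg ((nbrs.getD x.toNat []).filter
            (fun v => !((st.1.setIfInBounds x.toNat true).getD v.toNat false)))).foldl
            (fun s v => if s.1.getD v.toNat false then s else pvDfsA nbrs deg f' v s)
            (st.1.setIfInBounds x.toNat true, st.2.push x) := by
        rw [pvDfsA]
      rw [hdfs]
      have hfm := pvFoldStep_mono nbrs deg f'
        (pvSortNbrs deg ((nbrs.getD x.toNat []).filter
          (fun v => !((st.1.setIfInBounds x.toNat true).getD v.toNat false))))
        (st.1.setIfInBounds x.toNat true, st.2.push x)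
      have hucr : pvUC n ((pvSortNbrs deg ((nbrs.getD x.toNat []).filter
          (fun v => !((st.1.setIfInBounds x.toNat true).getD v.toNat false)))).foldl
            (fun s v => if s.1.getD v.toNat false then s else pvDfsA nbrs deg f' v s)
            (st.1.setIfInBounds x.toNat true, st.2.push x)).1
          ≤ pvUC n (st.1.setIfInBounds x.toNat true) :=
        pvUC_mono n _ _ hfm.2
      exact pvLoopB_fuel nbrs deg n hn _ tail _ f' (f' + 1)
        (hfm.1.trans hsz')
        le_rfl (le_trans hucr hstf) (by omega) htail

-- the seed loops of pvLoopB and A's dfs agree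
theorem pvSeedsFold (nbrs : Array (List Int)) (deg : Array Int) (n : Int)
    (hn : ∀ (u : Nat) (v : Int), v ∈ nbrs.getD u [] → 0 ≤ v ∧ v < n) :
    ∀ (l : List Int), (∀ u ∈ l, 0 ≤ u ∧ u < n) →
    ∀ (st : Array Bool × Array Int), st.1.size = n.toNat →
    l.foldl (fun s u => if s.1.getD u.toNat false then s else pvLoopB nbrs deg n.toNat [u] s) st =
    l.foldl (fun s u => if s.1.getD u.toNat false then s else pvDfsA nbrs deg n.toNat u s) st := by
  intro l
  induction l with
  | nil => intro _ st _; rfl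
  | cons u l ihl =>
    intro hl st hsz
    have hu := hl u List.mem_cons_self
    have hstep : (if st.1.getD u.toNat false then st else pvLoopB nbrs deg n.toNat [u] st) =
        (if st.1.getD u.toNat false then st else pvDfsA nbrs deg n.toNat u st) := by
      by_cases hc : st.1.getD u.toNat false = true
      · rw [if_pos hc, if_pos hc]
      · have hM := pvM nbrs deg n hn (pvUC n st.1) st u [] n.toNat hsz le_rfl
          (pvUC_le n st.1) hu.1 hu.2 (by intro y hy; cases hy)
        rw [if_neg hc, if_neg hc]
        rw [hM, pvLoopB_nil, if_neg hc]
    have hstep_sz : (if st.1.getD u.toNat false then st else pvDfsA nbrs deg n.toNat u st).1.size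
        = n.toNat := by
      by_cases hc : st.1.getD u.toNat false = true
      · rw [if_pos hc]; exact hsz
      · rw [if_neg hc]
        exact (pvDfsA_mono nbrs deg n.toNat u st).1.trans hsz
    rw [List.foldl_cons, List.foldl_cons, hstep]
    exact ihl (fun y hy => hl y (List.mem_cons_of_mem _ hy)) _ hstep_sz

-- ---------- B's stack loop vs pvLoopB: lockstep bisimulation ----------

theorem pvStackB_nil (desc : PySem.Dict Int (List Int)) (f : Nat)
    (st : List Int × List Int) : pvStackB desc f [] st = st := by
  rw [pvStackB]

theorem pvStackB_cons_visited (desc : PySem.Dict Int (List Int)) (f : Nat)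
    (u : Int) (rest : List Int) (st : List Int × List Int)
    (h : st.1.contains u = true) :
    pvStackB desc f (u :: rest) st = pvStackB desc f rest st := by
  rw [pvStackB.eq_def]; simp only [h, if_pos]

theorem pvStackB_zero_unvisited (desc : PySem.Dict Int (List Int))
    (u : Int) (rest : List Int) (st : List Int × List Int)
    (h : st.1.contains u = false) :
    pvStackB desc 0 (u :: rest) st = st := by
  rw [pvStackB.eq_def]; simp only [h, Bool.false_eq_true, if_false]

theorem pvStackB_cons_unvisited (desc : PySem.Dict Int (List Int)) (f : Nat)
    (u : Int) (rest : List Int) (st : List Int × List Int)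
    (h : st.1.contains u = false) :
    pvStackB desc (f+1) (u :: rest) st =
      pvStackB desc f
        (((desc.getD u []).filter
            (fun v => !((PySem.Set.add st.1 u).contains v))).reverse ++ rest)
        (PySem.Set.add st.1 u, st.2 ++ [u]) := by
  rw [pvStackB.eq_def]; simp only [h, Bool.false_eq_true, if_false]

theorem pvBisim (edge_face_pairs : List (Int × Int)) (num_faces : Int) :
    ∀ (f : Nat) (stack : List Int) (sB : List Int × List Int) (sA : Array Bool × Array Int),
    sA.1.size = num_faces.toNat →
    (∀ v : Int, 0 ≤ v → v < num_faces → sB.1.contains v = sA.1.getD v.toNat false) →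
    sB.2 = sA.2.toList →
    (∀ y ∈ stack, 0 ≤ y ∧ y < num_faces) →
    ((pvLoopB (pvBuildNbrs edge_face_pairs num_faces) (pvDegs (pvBuildNbrs edge_face_pairs num_faces)) f stack sA).1.size = num_faces.toNat) ∧
    (∀ v : Int, 0 ≤ v → v < num_faces →
      (pvStackB (pvDescB (pvAdjB edge_face_pairs num_faces) (pvDegB (pvAdjB edge_face_pairs num_faces))) f stack sB).1.contains v
        = (pvLoopB (pvBuildNbrs edge_face_pairs num_faces) (pvDegs (pvBuildNbrs edge_face_pairs num_faces)) f stack sA).1.getD v.toNat false) ∧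
    (pvStackB (pvDescB (pvAdjB edge_face_pairs num_faces) (pvDegB (pvAdjB edge_face_pairs num_faces))) f stack sB).2
      = (pvLoopB (pvBuildNbrs edge_face_pairs num_faces) (pvDegs (pvBuildNbrs edge_face_pairs num_faces)) f stack sA).2.toList := by
  intro f
  induction f with
  | zero =>
    intro stack
    induction stack with
    | nil =>
      intro sB sA hsz hcorr hord hstk
      rw [pvStackB_nil, pvLoopB_nil]
      exact ⟨hsz, hcorr, hord⟩
    | cons u rest ihs =>
      intro sB sA hsz hcorr hord hstk
      have hu := hstk u List.mem_cons_self
      have hcu := hcorr u hu.1 hu.2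
      by_cases hv : sA.1.getD u.toNat false = true
      · rw [pvStackB_cons_visited _ _ _ _ _ (by rw [hcu]; exact hv),
          pvLoopB_cons_visited _ _ _ _ _ _ hv]
        exact ihs sB sA hsz hcorr hord (fun y hy => hstk y (List.mem_cons_of_mem _ hy))
      · have hv' : sA.1.getD u.toNat false = false := by simpa using hv
        rw [pvStackB_zero_unvisited _ _ _ _ (by rw [hcu]; exact hv'),
          pvLoopB_zero_unvisited _ _ _ _ _ hv']
        exact ⟨hsz, hcorr, hord⟩
  | succ f ihf =>
    intro stack
    induction stack with
    | nil =>
      intro sB sA hsz hcorr hord hstk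
      rw [pvStackB_nil, pvLoopB_nil]
      exact ⟨hsz, hcorr, hord⟩
    | cons u rest ihs =>
      intro sB sA hsz hcorr hord hstk
      have hu := hstk u List.mem_cons_self
      have hcu := hcorr u hu.1 hu.2
      by_cases hv : sA.1.getD u.toNat false = true
      · rw [pvStackB_cons_visited _ _ _ _ _ (by rw [hcu]; exact hv),
          pvLoopB_cons_visited _ _ _ _ _ _ hv]
        exact ihs sB sA hsz hcorr hord (fun y hy => hstk y (List.mem_cons_of_mem _ hy))
      · have hv' : sA.1.getD u.toNat false = false := by simpa using hv
        have hcu' : sB.1.contains u = false := by rw [hcu]; exact hv'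
        rw [pvStackB_cons_unvisited _ _ _ _ _ hcu',
          pvLoopB_cons_unvisited _ _ _ _ _ _ hv']
        -- Set.add appends here
        have hadd : PySem.Set.add sB.1 u = sB.1 ++ [u] := by
          simp only [PySem.Set.add, PySem.Set.contains_eq_listContains, hcu',
            Bool.false_eq_true, if_false]
        -- the updated visited states still correspond
        have hcorr' : ∀ v : Int, 0 ≤ v → v < num_faces →
            (PySem.Set.add sB.1 u).contains v
              = (sA.1.setIfInBounds u.toNat true).getD v.toNat false := by
          intro v hv0 hvn
          rw [hadd, PySem.Set.contains_eq_listContains, List.contains_append, pvGetD_set]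
          by_cases hvu : v = u
          · subst hvu
            rw [if_pos (show v.toNat = v.toNat ∧ v.toNat < sA.1.size from ⟨rfl, by omega⟩)]
            simp
          · rw [if_neg (fun hx => hvu (by omega))]
            have hsing : ([u].contains v) = false := by simp [hvu]
            rw [hsing, Bool.or_false]
            exact hcorr v hv0 hvn
        -- the pushed segments coincide
        have hnd : ((pvBuildNbrs edge_face_pairs num_faces).getD u.toNat []).Nodup :=
          pvBuildNbrs_nodup edge_face_pairs num_faces u.toNat
        have hseg : (((pvDescB (pvAdjB edge_face_pairs num_faces) (pvDegB (pvAdjB edge_face_pairs num_faces))).getD u []).filter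
              (fun v => !((PySem.Set.add sB.1 u).contains v))).reverse
            = pvSortNbrs (pvDegs (pvBuildNbrs edge_face_pairs num_faces))
                (((pvBuildNbrs edge_face_pairs num_faces).getD u.toNat []).filter
                  (fun v => !((sA.1.setIfInBounds u.toNat true).getD v.toNat false))) := by
          rw [pvDescB_eq edge_face_pairs num_faces u hu.1 hu.2, List.filter_reverse,
            List.reverse_reverse]
          rw [List.filter_congr (q := fun v => !((sA.1.setIfInBounds u.toNat true).getD v.toNat false)) ?_]
          · exact pvFilter_sortNbrs _ _ hnd _
          · intro x hx
            have hxl : x ∈ (pvBuildNbrs edge_face_pairs num_faces).getD u.toNat [] :=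
              (pvSortNbrs_mem _ _ x).mp hx
            have hxb := pvBuildNbrs_mem edge_face_pairs num_faces u.toNat x hxl
            rw [hcorr' x hxb.1 hxb.2]
        rw [hseg]
        refine ihf _ (PySem.Set.add sB.1 u, sB.2 ++ [u])
          (sA.1.setIfInBounds u.toNat true, sA.2.push u)
          (by simpa using hsz) hcorr'
          (by simp only [Array.toList_push]; rw [hord])
          ?_
        intro y hy
        rcases List.mem_append.mp hy with h | h
        · have := (pvSortNbrs_mem _ _ y).mp h
          exact pvBuildNbrs_mem edge_face_pairs num_faces u.toNat y (List.mem_filter.mp this).1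
        · exact hstk y (List.mem_cons_of_mem _ h)

theorem pvSeedFoldBisim (edge_face_pairs : List (Int × Int)) (num_faces : Int) :
    ∀ (l : List Int), (∀ u ∈ l, 0 ≤ u ∧ u < num_faces) →
    ∀ (sB : List Int × List Int) (sA : Array Bool × Array Int),
    sA.1.size = num_faces.toNat →
    (∀ v : Int, 0 ≤ v → v < num_faces → sB.1.contains v = sA.1.getD v.toNat false) →
    sB.2 = sA.2.toList →
    (l.foldl (fun s u => if s.1.contains u then s
        else pvStackB (pvDescB (pvAdjB edge_face_pairs num_faces) (pvDegB (pvAdjB edge_face_pairs num_faces))) num_faces.toNat [u] s) sB).2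
      = (l.foldl (fun s u => if s.1.getD u.toNat false then s
        else pvLoopB (pvBuildNbrs edge_face_pairs num_faces) (pvDegs (pvBuildNbrs edge_face_pairs num_faces)) num_faces.toNat [u] s) sA).2.toList := by
  intro l
  induction l with
  | nil => intro _ sB sA _ _ hord; exact hord
  | cons u l ihl =>
    intro hl sB sA hsz hcorr hord
    have hu := hl u List.mem_cons_self
    have hcu := hcorr u hu.1 hu.2
    rw [List.foldl_cons, List.foldl_cons]
    by_cases hv : sA.1.getD u.toNat false = true
    · rw [if_pos (by rw [hcu]; exact hv), if_pos hv]
      exact ihl (fun y hy => hl y (List.mem_cons_of_mem _ hy)) sB sA hsz hcorr hord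
    · have hv' : sA.1.getD u.toNat false = false := by simpa using hv
      rw [if_neg (by rw [hcu]; exact fun h => by rw [hv'] at h; cases h),
        if_neg (by rw [hv']; exact fun h => by cases h)]
      obtain ⟨hsz2, hcorr2, hord2⟩ := pvBisim edge_face_pairs num_faces num_faces.toNat [u] sB sA
        hsz hcorr hord (by intro y hy; rw [List.mem_singleton] at hy; exact hy ▸ hu)
      exact ihl (fun y hy => hl y (List.mem_cons_of_mem _ hy)) _ _ hsz2 hcorr2 hord2

-- packaging the two result tuples
theorem pvOutPair (oA : Array Int) (oB : List Int) (h : oB = oA.toList) :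
    (oA.toList, (PySem.List.enumerate oA.toList 0).map (fun p => (p.2, p.1)))
      = (oB, (PySem.List.enumerate oB 0).map (fun p => (p.2, p.1))) := by
  rw [h]

-- ===== VERDICT (by name: the statement is the Claim_ definition above) =====
theorem dfs_face_ordering_from_core_spec : Claim_equal_dfs_face_ordering_from_core := by
  intro edge_face_pairs num_faces _
  unfold Spec_dfs_face_ordering_from_core
  have hn : ∀ (u : Nat) (v : Int),
      v ∈ (pvBuildNbrs edge_face_pairs num_faces).getD u [] → 0 ≤ v ∧ v < num_faces :=
    fun u v h => pvBuildNbrs_mem edge_face_pairs num_faces u v h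
  have hseeds : ∀ u ∈ pvSeeds (pvDegs (pvBuildNbrs edge_face_pairs num_faces)) num_faces,
      0 ≤ u ∧ u < num_faces :=
    fun u h => pvSeeds_mem _ _ u h
  have hA := pvSeedsFold (pvBuildNbrs edge_face_pairs num_faces)
    (pvDegs (pvBuildNbrs edge_face_pairs num_faces)) num_faces hn _ hseeds
    (Array.replicate num_faces.toNat false, #[]) (by simp)
  have hB := pvSeedFoldBisim edge_face_pairs num_faces
    (pvSeeds (pvDegs (pvBuildNbrs edge_face_pairs num_faces)) num_faces) hseeds
    ([], []) (Array.replicate num_faces.toNat false, #[])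
    (by simp)
    (by
      intro v _ _
      rw [pvReplicate_getD _ _ _ _ rfl]
      rfl)
    (by simp)
  -- B's order list = A's order list
  have key : ((PySem.List.sorted2 (PySem.List.pyRange 0 num_faces 1)
        (fun x => -((pvDegB (pvAdjB edge_face_pairs num_faces)).getD x 0)) (fun x => x) false).foldl
        (fun s u => if s.1.contains u then s
          else pvStackB (pvDescB (pvAdjB edge_face_pairs num_faces) (pvDegB (pvAdjB edge_face_pairs num_faces)))
            num_faces.toNat [u] s) ([], [])).2
      = ((pvSeeds (pvDegs (pvBuildNbrs edge_face_pairs num_faces)) num_faces).foldl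
        (fun s u => if s.1.getD u.toNat false then s
          else pvDfsA (pvBuildNbrs edge_face_pairs num_faces) (pvDegs (pvBuildNbrs edge_face_pairs num_faces))
            num_faces.toNat u s) (Array.replicate num_faces.toNat false, #[])).2.toList := by
    rw [pvSeedsB_eq, ← hA]
    exact hB
  exact pvOutPair _ _ key
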